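-- pv_equiv track=rewrite | github.com/zyy20009619/cluster | algos/CommonFunction.py | getRealColor
-- ===== SOURCE A (Python) =====
-- def getRealColor(variable):
--     colorDict = {}
--     colorIndex = 0
--     for variableIndex in range(len(variable)):
--         colorDict[variable[variableIndex]] = colorIndex
--         if variable[variableIndex] == "module-info":
--             colorIndex += 1
--     return colorDict
-- ===== SOURCE B (Python) =====
-- def getRealColor(variable):
--     # last occurrence index of each name (keys keep first-occurrence order)
--     last = {}
--     for i, v in enumerate(variable):
--         last[v] = i
--     # sorted positions of "module-info"
--     mods = [i for i, v in enumerate(variable) if v == "module-info"]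
--     # color of a name = how many "module-info" occur strictly before its last
--     # occurrence = rank of that index in mods, found by binary search
--     def rank(x):
--         lo, hi = 0, len(mods)
--         while lo < hi:
--             mid = (lo + hi) // 2
--             if mods[mid] < x:
--                 lo = mid + 1
--             else:
--                 hi = mid
--         return lo
--     return {v: rank(i) for v, i in last.items()}
-- ===== Notes on version B (the rewrite author's own statement) =====
-- stated objective: alternative
-- what changed: A makes one pass threading a running counter into dict writes; B never keeps a counter: it builds a last-occurrence index map and the sorted list of module-info positions, then assigns each distinct name the rank of its last index in that list via binary search.
import Mathlib
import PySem

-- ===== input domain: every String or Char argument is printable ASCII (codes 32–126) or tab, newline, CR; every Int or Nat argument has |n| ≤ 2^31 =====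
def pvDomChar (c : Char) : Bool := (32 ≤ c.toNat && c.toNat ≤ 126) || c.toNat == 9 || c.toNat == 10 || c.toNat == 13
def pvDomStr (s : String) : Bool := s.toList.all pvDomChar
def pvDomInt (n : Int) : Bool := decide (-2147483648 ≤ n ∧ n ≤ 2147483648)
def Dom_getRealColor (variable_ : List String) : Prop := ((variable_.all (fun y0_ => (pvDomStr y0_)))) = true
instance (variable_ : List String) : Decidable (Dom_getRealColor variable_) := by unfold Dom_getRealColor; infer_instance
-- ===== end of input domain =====

-- B drops A's running counter: it builds a last-occurrence index map and the sorted list of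
-- "module-info" positions, then colors each distinct name by the binary-search rank of its
-- last index in that list (alternative algorithm, same results).

-- ===== PORT A =====
def getRealColor (variable_ : List String) : List (String × Int) :=
  let st := (PySem.List.pyRange 0 variable_.length 1).foldl
    (fun (st : PySem.Dict String Int × Int) i =>
      let v := PySem.List.pyGetD variable_ i ""
      (st.1.insert v st.2, if v = "module-info" then st.2 + 1 else st.2))
    (PySem.Dict.empty, 0)
  st.1.items

-- ===== PORT B =====
/-- B's inner `rank`: the Python `while lo < hi` binary-search loop, step for step. -/
def rankLoop (mods : List Int) (x lo hi : Int) : Int :=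
  if h : lo < hi then
    let mid := PySem.Int.floordiv (lo + hi) 2
    if PySem.List.pyGetD mods mid 0 < x then rankLoop mods x (mid + 1) hi
    else rankLoop mods x lo mid
  else lo
termination_by (hi - lo).toNat
decreasing_by
  · have h1 : lo ≤ PySem.Int.floordiv (lo + hi) 2 :=
      (PySem.Int.le_floordiv_iff_mul_le (by norm_num)).2 (by omega)
    omega
  · have h2 : PySem.Int.floordiv (lo + hi) 2 < hi :=
      (PySem.Int.floordiv_lt_iff_lt_mul (by norm_num)).2 (by omega)
    omega

def getRealColor_alt (variable_ : List String) : List (String × Int) :=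
  let last := (PySem.List.enumerate variable_).foldl
    (fun (d : PySem.Dict String Int) p => d.insert p.2 p.1) PySem.Dict.empty
  let mods := ((PySem.List.enumerate variable_).filter
    (fun p => p.2 == "module-info")).map (fun p => p.1)
  let out := last.items.foldl
    (fun (d : PySem.Dict String Int) p =>
      d.insert p.1 (rankLoop mods p.2 0 (mods.length : Int))) PySem.Dict.empty
  out.items

-- ===== PRECONDITION & SPEC =====
def Spec_getRealColor (variable_ : List String) (out : List (String × Int)) : Prop := out = getRealColor_alt variable_
instance (variable_ : List String) (out : List (String × Int)) : Decidable (Spec_getRealColor variable_ out) := by unfold Spec_getRealColor; infer_instance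

-- ===== CLAIM (what is proved, stated in full; the proofs are below) =====
def Claim_equal_getRealColor : Prop := ∀ (variable_ : List String), Dom_getRealColor variable_ → Spec_getRealColor variable_ (getRealColor variable_)

-- ===== LEMMAS AND PROOFS =====

/-- map a function over a dict's values (keys and their order untouched) -/
def mapVal (f : Int → Int) (d : PySem.Dict String Int) : PySem.Dict String Int :=
  PySem.Dict.mk (d.items.map (fun p => (p.1, f p.2)))

lemma contains_mapVal (f : Int → Int) (d : PySem.Dict String Int) (k : String) :
    (mapVal f d).contains k = d.contains k := by
  simp [mapVal, PySem.Dict.contains, List.any_map, Function.comp_def]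

lemma insert_mapVal (f : Int → Int) (d : PySem.Dict String Int) (k : String) (v : Int) :
    (mapVal f d).insert k (f v) = mapVal f (d.insert k v) := by
  apply PySem.Dict.ext
  rw [PySem.Dict.items_insert, contains_mapVal]
  simp only [mapVal]
  rw [PySem.Dict.items_insert]
  by_cases h : d.contains k = true
  · simp only [h, if_true, List.map_map]
    apply List.map_congr_left
    intro p _
    by_cases hp : p.1 = k <;> simp [hp]
  · simp [h]

lemma enum_cons (a : String) (t : List String) (k : Int) :
    PySem.List.enumerate (a :: t) k = (k, a) :: PySem.List.enumerate t (k + 1) := rfl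

lemma mem_enumerate (l : List String) (k i : Int) (x : String) :
    (i, x) ∈ PySem.List.enumerate l k → ∃ j : Nat, i = k + j ∧ ∃ hj : j < l.length, l[j] = x := by
  induction l generalizing k with
  | nil => simp
  | cons a t ih =>
    intro hm
    rw [enum_cons, List.mem_cons] at hm
    rcases hm with hm | hm
    · exact ⟨0, by simp at hm; simp [hm.1], by simp, by simp at hm; simp [hm.2]⟩
    · obtain ⟨j, hj1, hj2, hj3⟩ := ih (k + 1) hm
      exact ⟨j + 1, by push_cast; omega, by simpa using hj2, by simpa using hj3⟩

/-- A's counter loop is the value-mapped version of B's last-occurrence loop. -/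
lemma foldA_eq_mapVal (f : Int → Int) (l : List String) (k : Int) (d0 : PySem.Dict String Int)
    (hstep : ∀ i x, (i, x) ∈ PySem.List.enumerate l k →
      f (i + 1) = f i + (if x = "module-info" then 1 else 0)) :
    (l.foldl (fun (st : PySem.Dict String Int × Int) v =>
        (st.1.insert v st.2, if v = "module-info" then st.2 + 1 else st.2))
      (mapVal f d0, f k)).1
    = mapVal f ((PySem.List.enumerate l k).foldl
        (fun (d : PySem.Dict String Int) p => d.insert p.2 p.1) d0) := by
  induction l generalizing k d0 with
  | nil => simp
  | cons v t ih =>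
    have hhead : f (k + 1) = f k + (if v = "module-info" then 1 else 0) :=
      hstep k v (by rw [enum_cons]; exact List.mem_cons_self ..)
    have hctr : (if v = "module-info" then f k + 1 else f k) = f (k + 1) := by
      rw [hhead]; split_ifs <;> ring
    rw [enum_cons]
    simp only [List.foldl_cons]
    rw [hctr, insert_mapVal]
    exact ih (k + 1) (d0.insert v k)
      (fun i x hm => hstep i x (by rw [enum_cons]; exact List.mem_cons_of_mem _ hm))

lemma items_foldl_last_sub (pl : List (Int × String)) (d0 : PySem.Dict String Int) :
    ∀ q ∈ (pl.foldl (fun (d : PySem.Dict String Int) p => d.insert p.2 p.1) d0).items,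
      q ∈ d0.items ∨ (q.2, q.1) ∈ pl := by
  induction pl generalizing d0 with
  | nil => intro q hq; exact Or.inl hq
  | cons p t ih =>
    intro q hq
    rcases ih (d0.insert p.2 p.1) q hq with h | h
    · rw [PySem.Dict.mem_items_insert] at h
      rcases h with h | ⟨h, _⟩
      · right; rw [h]; exact List.mem_cons_self ..
      · exact Or.inl h
    · exact Or.inr (List.mem_cons_of_mem _ h)

lemma countP_eq_of_char (l : List Int) (p : Int → Bool) (k : Nat) (hk : k ≤ l.length)
    (h1 : ∀ j (hj : j < l.length), j < k → p l[j] = true)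
    (h2 : ∀ j (hj : j < l.length), k ≤ j → p l[j] = false) : l.countP p = k := by
  induction l generalizing k with
  | nil => simp at hk ⊢; omega
  | cons a t ih =>
    cases k with
    | zero =>
      have ha : p a = false := h2 0 (by simp) (by omega)
      have hc : List.countP p (a :: t) = List.countP p t := by
        simp [ha]
      rw [hc]
      exact ih 0 (by omega) (fun j hj h => absurd h (Nat.not_lt_zero j))
        (fun j hj _ => by simpa using h2 (j + 1) (by simpa using hj) (by omega))
    | succ m =>
      have ha : p a = true := h1 0 (by simp) (by omega)
      have hc : List.countP p (a :: t) = List.countP p t + 1 := by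
        simp [ha]
      rw [hc]
      have := ih m (by simpa using hk)
        (fun j hj hjm => by simpa using h1 (j + 1) (by simpa using hj) (by omega))
        (fun j hj hjm => by simpa using h2 (j + 1) (by simpa using hj) (by omega))
      omega

lemma rankLoop_eq (mods : List Int) (hs : mods.Pairwise (· ≤ ·)) (x : Int) :
    ∀ (n : Nat) (lo hi : Int), (hi - lo).toNat = n → 0 ≤ lo → lo ≤ hi → hi ≤ mods.length →
    (∀ j (hj : j < mods.length), j < lo.toNat → mods[j] < x) →
    (∀ j (hj : j < mods.length), hi.toNat ≤ j → ¬ mods[j] < x) →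
    rankLoop mods x lo hi = (mods.countP (fun m => decide (m < x)) : Int) := by
  intro n
  induction n using Nat.strong_induction_on with
  | _ n ihn =>
    intro lo hi hn h0 hlh hhi hA hB
    rw [rankLoop]
    split_ifs with hlt
    all_goals try dsimp only
    · have hm0 : lo ≤ PySem.Int.floordiv (lo + hi) 2 :=
        (PySem.Int.le_floordiv_iff_mul_le (by norm_num)).2 (by omega)
      have hm1 : PySem.Int.floordiv (lo + hi) 2 < hi :=
        (PySem.Int.floordiv_lt_iff_lt_mul (by norm_num)).2 (by omega)
      set mid := PySem.Int.floordiv (lo + hi) 2 with hmid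
      have hmlen : mid.toNat < mods.length := by omega
      rw [PySem.List.pyGetD_eq_getElem mods 0 (by omega) (by omega)]
      have hpw := List.pairwise_iff_getElem.1 hs
      split_ifs with hcmp
      · exact ihn (hi - (mid + 1)).toNat (by omega) (mid + 1) hi rfl (by omega) (by omega) hhi
          (fun j hj hjlt => by
            rcases Nat.lt_or_ge j mid.toNat with hj2 | hj2
            · exact lt_of_le_of_lt (hpw j mid.toNat hj hmlen hj2) hcmp
            · have : j = mid.toNat := by omega
              subst this; exact hcmp)
          hB
      · push Not at hcmp
        exact ihn (mid - lo).toNat (by omega) lo mid rfl h0 (by omega) (by omega) hA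
          (fun j hj hge => by
            push Not
            rcases Nat.lt_or_ge mid.toNat j with hj2 | hj2
            · exact le_trans hcmp (hpw mid.toNat j hmlen hj hj2)
            · have : j = mid.toNat := by omega
              subst this; exact hcmp)
    · have hle : lo = hi := by omega
      have hcnt : mods.countP (fun m => decide (m < x)) = lo.toNat := by
        apply countP_eq_of_char mods _ lo.toNat (by omega)
          (fun j hj hjlt => by simpa using hA j hj hjlt)
          (fun j hj hge => by simpa using hB j hj (by omega))
      rw [hcnt]; omega

lemma enumerate_fst_le (l : List String) (k : Int) :
    ∀ q ∈ PySem.List.enumerate l k, k ≤ q.1 := by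
  intro q hq
  obtain ⟨j, hj1, _, _⟩ := mem_enumerate l k q.1 q.2 (by simpa using hq)
  omega

lemma enumerate_fst_pairwise (l : List String) (k : Int) :
    (PySem.List.enumerate l k).Pairwise (fun p q => p.1 < q.1) := by
  induction l generalizing k with
  | nil => simp
  | cons a t ih =>
    rw [enum_cons]
    exact List.Pairwise.cons
      (fun q hq => lt_of_lt_of_le (by omega) (enumerate_fst_le t (k + 1) q hq)) (ih (k + 1))

lemma count_lemma (l : List String) (k x : Int) :
    ((((PySem.List.enumerate l k).filter (fun p => p.2 == "module-info")).map
        (fun p => p.1)).countP (fun m => decide (m < x)))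
      = (l.take (x - k).toNat).count "module-info" := by
  induction l generalizing k with
  | nil => simp
  | cons v t ih =>
    rw [enum_cons, List.filter_cons]
    by_cases hv : v = "module-info"
    · rw [if_pos (by simp [hv]), List.map_cons, List.countP_cons, ih (k + 1)]
      by_cases hxk : x ≤ k
      · have h0 : (x - k).toNat = 0 := by omega
        have h1 : (x - (k + 1)).toNat = 0 := by omega
        simp [h0, h1]
        omega
      · have h2 : (x - k).toNat = (x - (k + 1)).toNat + 1 := by omega
        rw [h2, List.take_succ_cons, hv, List.count_cons_self]
        simp [(by omega : k < x)]
        try omega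
    · rw [if_neg (by simp [hv]), ih (k + 1)]
      by_cases hxk : x ≤ k
      · have h0 : (x - k).toNat = 0 := by omega
        have h1 : (x - (k + 1)).toNat = 0 := by omega
        rw [h0, h1]
        simp
      · have h2 : (x - k).toNat = (x - (k + 1)).toNat + 1 := by omega
        rw [h2, List.take_succ_cons, List.count_cons_of_ne (by simp [hv])]

-- ===== VERDICT (by name: the statement is the Claim_ definition above) =====
theorem getRealColor_spec : Claim_equal_getRealColor := by
  intro variable_ _
  show getRealColor variable_ = getRealColor_alt variable_
  unfold getRealColor getRealColor_alt
  set f : Int → Int := fun i => ((variable_.take i.toNat).count "module-info" : Int) with hf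
  set L : PySem.Dict String Int := (PySem.List.enumerate variable_).foldl
    (fun (d : PySem.Dict String Int) p => d.insert p.2 p.1) PySem.Dict.empty with hL
  set mods : List Int := ((PySem.List.enumerate variable_).filter
    (fun p => p.2 == "module-info")).map (fun p => p.1) with hmods
  -- A's loop over range(len(variable)) is the same loop over the list itself
  rw [PySem.List.foldl_pyRange_zero_pyGetD' variable_ ""
    (fun (st : PySem.Dict String Int × Int) v =>
      (st.1.insert v st.2, if v = "module-info" then st.2 + 1 else st.2))]
  -- A's dict is B's last-occurrence dict with values mapped through f
  have hstep : ∀ i x, (i, x) ∈ PySem.List.enumerate variable_ 0 →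
      f (i + 1) = f i + (if x = "module-info" then 1 else 0) := by
    intro i x hm
    obtain ⟨j, hj1, hj2, hj3⟩ := mem_enumerate variable_ 0 i x hm
    have hti : (i + 1).toNat = j + 1 := by omega
    have hti0 : i.toNat = j := by omega
    simp only [hf, hti, hti0, List.take_add_one]
    rw [List.getElem?_eq_getElem hj2, hj3]
    by_cases hx : x = "module-info" <;>
      simp [hx, List.count_append]
  have h0 : ((PySem.Dict.empty : PySem.Dict String Int), (0 : Int))
      = (mapVal f PySem.Dict.empty, f 0) := by
    simp [mapVal, hf, PySem.Dict.empty]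
  have h1 : (variable_.foldl (fun (st : PySem.Dict String Int × Int) v =>
        (st.1.insert v st.2, if v = "module-info" then st.2 + 1 else st.2))
      (PySem.Dict.empty, 0)).1 = mapVal f L := by
    rw [h0]
    exact foldA_eq_mapVal f variable_ 0 PySem.Dict.empty hstep
  dsimp only
  rw [h1]
  -- B's output dict inserts L's (distinct) keys in order, so its items are a map of L's
  have hnodup : L.keys.Nodup := by
    rw [hL]
    exact PySem.Dict.nodup_keys_foldl_insert_key (PySem.List.enumerate variable_)
      (fun p => p.2) (fun d p => p.1) PySem.Dict.empty PySem.Dict.nodup_keys_empty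
  have hfresh := PySem.Dict.items_foldl_insert_fresh (l := L.items)
    (k := fun p => p.1) (v := fun p => rankLoop mods p.2 0 (mods.length : Int))
    (d := (PySem.Dict.empty : PySem.Dict String Int))
    (by intro a _; simp [PySem.Dict.contains_empty])
    (by simpa [PySem.Dict.keys] using hnodup)
  rw [hfresh]
  show (mapVal f L).items = PySem.Dict.empty.items ++ L.items.map
    (fun p => (p.1, rankLoop mods p.2 0 (mods.length : Int)))
  have hemp : (PySem.Dict.empty : PySem.Dict String Int).items = [] := rfl
  rw [hemp, List.nil_append]
  show L.items.map (fun p => (p.1, f p.2)) = L.items.map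
    (fun p => (p.1, rankLoop mods p.2 0 (mods.length : Int)))
  apply List.map_congr_left
  intro p hp
  -- p's value is a genuine index of the list
  have hmem := items_foldl_last_sub (PySem.List.enumerate variable_) PySem.Dict.empty p
    (by rw [hL] at hp; exact hp)
  rcases hmem with h | h
  · rw [hemp] at h
    simp at h
  -- mods is sorted
  have hpair : mods.Pairwise (· ≤ ·) := by
    rw [hmods, List.pairwise_map]
    exact ((enumerate_fst_pairwise variable_ 0).filter _).imp (fun hlt => le_of_lt hlt)
  have hrank := rankLoop_eq mods hpair p.2 ((mods.length : Int) - 0).toNat 0 (mods.length : Int)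
    rfl (le_refl 0) (by omega) (by omega)
    (fun j hj hlt => absurd hlt (by simp))
    (fun j hj hge => absurd hj (by omega))
  have hcount := count_lemma variable_ 0 p.2
  rw [hmods] at hrank
  rw [hrank, hcount]
  simp [hf]
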